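-- pv_equiv track=rewrite | github.com/tomato2718/AdvantOfCode2024 | src/day10/_hoof_it.py | _count_trailheads
-- ===== SOURCE A (Python) =====
-- _Coordinate = tuple[int, int]
--
-- _Heads = set[_Coordinate]
--
-- def _count_trailheads(
--     start: dict[_Coordinate, _Heads], end: dict[_Coordinate, _Heads]
-- ) -> int:
--     trailheads = set()
--     for coord, heads in start.items():
--         for tail in end.get(coord, set()):
--             for head in heads:
--                 trailheads.add((head, tail))
--     return len(trailheads)
-- ===== SOURCE B (Python) =====
-- def _count_trailheads(start, end):
--     all_heads = set()
--     for heads in start.values():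
--         all_heads |= heads
--     total = 0
--     for head in all_heads:
--         tails = set()
--         for coord, heads in start.items():
--             if head in heads:
--                 tails |= end.get(coord, set())
--         total += len(tails)
--     return total
-- ===== Notes on version B (the rewrite author's own statement) =====
-- stated objective: alternative
-- what changed: B inverts the iteration: it first collects the set of all heads, then for each head (head-major traversal) unions the tail sets of every coordinate whose start entry contains that head and sums the per-head tail-set sizes, instead of A's coord-major loop that materialises a flat set of (head, tail) pairs.
import Mathlib
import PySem

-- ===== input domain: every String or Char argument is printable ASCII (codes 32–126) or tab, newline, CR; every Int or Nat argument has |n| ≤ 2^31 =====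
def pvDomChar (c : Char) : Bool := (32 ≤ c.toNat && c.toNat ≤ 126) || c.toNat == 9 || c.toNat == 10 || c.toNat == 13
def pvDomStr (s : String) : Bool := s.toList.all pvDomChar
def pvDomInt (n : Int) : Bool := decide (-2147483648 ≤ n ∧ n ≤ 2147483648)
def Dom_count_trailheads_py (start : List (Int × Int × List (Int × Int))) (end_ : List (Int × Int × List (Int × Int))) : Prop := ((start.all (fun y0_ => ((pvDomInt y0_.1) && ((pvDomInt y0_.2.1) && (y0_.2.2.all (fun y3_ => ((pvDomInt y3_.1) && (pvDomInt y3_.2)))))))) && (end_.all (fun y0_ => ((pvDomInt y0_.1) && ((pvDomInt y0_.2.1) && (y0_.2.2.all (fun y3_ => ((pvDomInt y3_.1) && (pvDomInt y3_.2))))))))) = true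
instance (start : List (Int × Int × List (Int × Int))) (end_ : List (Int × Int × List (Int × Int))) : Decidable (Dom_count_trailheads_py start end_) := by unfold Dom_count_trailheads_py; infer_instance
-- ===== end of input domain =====

-- B inverts the iteration: head-major — collect all heads, then per head union the tail sets of
-- the coordinates whose start entry contains it, and sum the sizes (objective: alternative).


-- ===== PORT A =====
-- end.get(coord, set()): first-match lookup in the association list, defaulting to the empty set.
def pvEndGet (end_ : List (Int × Int × List (Int × Int))) (c : Int × Int) : List (Int × Int) :=
  match end_.find? (fun e => (e.1, e.2.1) == c) with
  | some e => e.2.2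
  | none => []

def count_trailheads_py (start : List (Int × Int × List (Int × Int))) (end_ : List (Int × Int × List (Int × Int))) : Int :=
  let trailheads : PySem.Set ((Int × Int) × Int × Int) :=
    start.foldl (fun th e =>
      (pvEndGet end_ (e.1, e.2.1)).foldl (fun th tail =>
        e.2.2.foldl (fun th head => PySem.Set.add th (head, tail)) th) th)
      PySem.Set.empty
  PySem.Set.len trailheads

-- ===== PORT B =====
-- tails of one head: union of end.get(coord) over the start entries containing that head.
def pvTailsOf (start : List (Int × Int × List (Int × Int))) (end_ : List (Int × Int × List (Int × Int))) (head : Int × Int) : PySem.Set (Int × Int) :=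
  start.foldl (fun s e =>
    if e.2.2.contains head then PySem.Set.update s (pvEndGet end_ (e.1, e.2.1)) else s)
    PySem.Set.empty

def count_trailheads_py_alt (start : List (Int × Int × List (Int × Int))) (end_ : List (Int × Int × List (Int × Int))) : Int :=
  let allHeads : PySem.Set (Int × Int) :=
    start.foldl (fun s e => PySem.Set.update s e.2.2) PySem.Set.empty
  allHeads.foldl (fun total head => total + PySem.Set.len (pvTailsOf start end_ head)) 0

-- ===== PRECONDITION & SPEC =====
def Spec_count_trailheads_py (start : List (Int × Int × List (Int × Int))) (end_ : List (Int × Int × List (Int × Int))) (out : Int) : Prop := out = count_trailheads_py_alt start end_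
instance (start : List (Int × Int × List (Int × Int))) (end_ : List (Int × Int × List (Int × Int))) (out : Int) : Decidable (Spec_count_trailheads_py start end_ out) := by unfold Spec_count_trailheads_py; infer_instance

-- ===== CLAIM (what is proved, stated in full; the proofs are below) =====
def Claim_equal_count_trailheads_py : Prop := ∀ (start : List (Int × Int × List (Int × Int))) (end_ : List (Int × Int × List (Int × Int))), Dom_count_trailheads_py start end_ → Spec_count_trailheads_py start end_ (count_trailheads_py start end_)

-- ===== LEMMAS AND PROOFS =====

-- A's per-entry step: membership after the two nested loops.
theorem pvA_step_mem (tails heads : List (Int × Int))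
    (th : PySem.Set ((Int × Int) × Int × Int)) (p : (Int × Int) × Int × Int) :
    p ∈ tails.foldl (fun th t => heads.foldl (fun th h => PySem.Set.add th (h, t)) th) th ↔
      p ∈ th ∨ (p.1 ∈ heads ∧ p.2 ∈ tails) := by
  induction tails generalizing th with
  | nil => simp
  | cons t ts ih =>
    simp only [List.foldl_cons, ih, PySem.Set.mem_foldl_add, List.mem_cons]
    constructor
    · rintro ((hp | ⟨b, hb, rfl⟩) | h)
      · exact Or.inl hp
      · exact Or.inr ⟨hb, Or.inl rfl⟩
      · exact Or.inr ⟨h.1, Or.inr h.2⟩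
    · rintro (hp | ⟨h1, (h2 | h2)⟩)
      · exact Or.inl (Or.inl hp)
      · exact Or.inl (Or.inr ⟨p.1, h1, by simp [← h2]⟩)
      · exact Or.inr ⟨h1, h2⟩

-- A's per-entry step preserves Nodup.
theorem pvA_step_nodup (tails heads : List (Int × Int))
    (th : PySem.Set ((Int × Int) × Int × Int)) (hn : th.Nodup) :
    (tails.foldl (fun th t => heads.foldl (fun th h => PySem.Set.add th (h, t)) th) th).Nodup := by
  induction tails generalizing th with
  | nil => exact hn
  | cons t ts ih =>
    refine ih _ ?_
    clear ih
    induction heads generalizing th with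
    | nil => exact hn
    | cons h hs ih2 => exact ih2 _ (PySem.Set.nodup_add _ _ hn)

-- A's whole loop: membership in the flat pair set.
theorem pvA_mem (end_ start : List (Int × Int × List (Int × Int)))
    (th : PySem.Set ((Int × Int) × Int × Int)) (p : (Int × Int) × Int × Int) :
    p ∈ start.foldl (fun th e =>
        (pvEndGet end_ (e.1, e.2.1)).foldl (fun th tail =>
          e.2.2.foldl (fun th head => PySem.Set.add th (head, tail)) th) th) th ↔
      p ∈ th ∨ ∃ e ∈ start, p.1 ∈ e.2.2 ∧ p.2 ∈ pvEndGet end_ (e.1, e.2.1) := by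
  induction start generalizing th with
  | nil => simp
  | cons e es ih =>
    simp only [List.foldl_cons, ih, pvA_step_mem, List.mem_cons]
    constructor
    · rintro ((hp | h) | ⟨e', he', h⟩)
      · exact Or.inl hp
      · exact Or.inr ⟨e, Or.inl rfl, h⟩
      · exact Or.inr ⟨e', Or.inr he', h⟩
    · rintro (hp | ⟨e', (rfl | he'), h⟩)
      · exact Or.inl (Or.inl hp)
      · exact Or.inl (Or.inr h)
      · exact Or.inr ⟨e', he', h⟩

theorem pvA_nodup (end_ start : List (Int × Int × List (Int × Int)))
    (th : PySem.Set ((Int × Int) × Int × Int)) (hn : th.Nodup) :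
    (start.foldl (fun th e =>
        (pvEndGet end_ (e.1, e.2.1)).foldl (fun th tail =>
          e.2.2.foldl (fun th head => PySem.Set.add th (head, tail)) th) th) th).Nodup := by
  induction start generalizing th with
  | nil => exact hn
  | cons e es ih => exact ih _ (pvA_step_nodup _ _ _ hn)

-- B's set of all heads: membership and Nodup.
theorem pvAllHeads_mem (start : List (Int × Int × List (Int × Int)))
    (s : PySem.Set (Int × Int)) (h : Int × Int) :
    h ∈ start.foldl (fun s e => PySem.Set.update s e.2.2) s ↔
      h ∈ s ∨ ∃ e ∈ start, h ∈ e.2.2 := by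
  induction start generalizing s with
  | nil => simp
  | cons e es ih =>
    simp only [List.foldl_cons, ih, PySem.Set.mem_update, List.mem_cons]
    constructor
    · rintro ((hp | hh) | ⟨e', he', hh⟩)
      · exact Or.inl hp
      · exact Or.inr ⟨e, Or.inl rfl, hh⟩
      · exact Or.inr ⟨e', Or.inr he', hh⟩
    · rintro (hp | ⟨e', (rfl | he'), hh⟩)
      · exact Or.inl (Or.inl hp)
      · exact Or.inl (Or.inr hh)
      · exact Or.inr ⟨e', he', hh⟩

theorem pvAllHeads_nodup (start : List (Int × Int × List (Int × Int)))
    (s : PySem.Set (Int × Int)) (hn : s.Nodup) :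
    (start.foldl (fun s e => PySem.Set.update s e.2.2) s).Nodup := by
  induction start generalizing s with
  | nil => exact hn
  | cons e es ih => exact ih _ (PySem.Set.nodup_update _ _ hn)

-- B's per-head tail set: membership and Nodup.
theorem pvTailsOf_mem (start end_ : List (Int × Int × List (Int × Int)))
    (h : Int × Int) (t : Int × Int) :
    t ∈ pvTailsOf start end_ h ↔
      ∃ e ∈ start, h ∈ e.2.2 ∧ t ∈ pvEndGet end_ (e.1, e.2.1) := by
  unfold pvTailsOf
  suffices H : ∀ s : PySem.Set (Int × Int),
      t ∈ start.foldl (fun s e =>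
        if e.2.2.contains h then PySem.Set.update s (pvEndGet end_ (e.1, e.2.1)) else s) s ↔
      t ∈ s ∨ ∃ e ∈ start, h ∈ e.2.2 ∧ t ∈ pvEndGet end_ (e.1, e.2.1) by
    simpa [PySem.Set.empty] using H PySem.Set.empty
  intro s
  induction start generalizing s with
  | nil => simp
  | cons e es ih =>
    simp only [List.foldl_cons, ih, List.mem_cons]
    split_ifs with hc
    · simp only [PySem.Set.mem_update]
      have hhe : h ∈ e.2.2 := by simpa using hc
      constructor
      · rintro ((hp | ht) | ⟨e', he', hh⟩)
        · exact Or.inl hp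
        · exact Or.inr ⟨e, Or.inl rfl, hhe, ht⟩
        · exact Or.inr ⟨e', Or.inr he', hh⟩
      · rintro (hp | ⟨e', (rfl | he'), hh⟩)
        · exact Or.inl (Or.inl hp)
        · exact Or.inl (Or.inr hh.2)
        · exact Or.inr ⟨e', he', hh⟩
    · have hhe : h ∉ e.2.2 := by simpa using hc
      constructor
      · rintro (hp | ⟨e', he', hh⟩)
        · exact Or.inl hp
        · exact Or.inr ⟨e', Or.inr he', hh⟩
      · rintro (hp | ⟨e', (rfl | he'), hh⟩)
        · exact Or.inl hp
        · exact absurd hh.1 hhe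
        · exact Or.inr ⟨e', he', hh⟩

theorem pvTailsOf_nodup (start end_ : List (Int × Int × List (Int × Int))) (h : Int × Int) :
    (pvTailsOf start end_ h).Nodup := by
  unfold pvTailsOf
  suffices H : ∀ s : PySem.Set (Int × Int), s.Nodup →
      (start.foldl (fun s e =>
        if e.2.2.contains h then PySem.Set.update s (pvEndGet end_ (e.1, e.2.1)) else s) s).Nodup from
    H PySem.Set.empty (by simp [PySem.Set.empty])
  intro s hn
  induction start generalizing s with
  | nil => exact hn
  | cons e es ih =>
    simp only [List.foldl_cons]
    split_ifs with hc
    · exact ih _ (PySem.Set.nodup_update _ _ hn)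
    · exact ih _ hn

-- The grouped flat list (head, tail) over distinct heads with nodup tail sets is Nodup.
theorem pvFlat_nodup (hs : List (Int × Int)) (f : Int × Int → PySem.Set (Int × Int))
    (hk : hs.Nodup) (hv : ∀ h, (f h).Nodup) :
    (hs.flatMap (fun h => (f h).map (fun t => (h, t)))).Nodup := by
  induction hs with
  | nil => simp
  | cons q rest ih =>
    simp only [List.nodup_cons] at hk
    simp only [List.flatMap_cons, List.nodup_append]
    refine ⟨List.Nodup.map (fun a b hab => by simpa using congrArg Prod.snd hab) (hv q),
      ih hk.2, ?_⟩
    rintro a ha b hb rfl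
    obtain ⟨t, _, rfl⟩ := List.mem_map.mp ha
    obtain ⟨p, hp, hb2⟩ := List.mem_flatMap.mp hb
    obtain ⟨u, _, hb3⟩ := List.mem_map.mp hb2
    have : q = p := by simpa using congrArg Prod.fst hb3.symm
    exact hk.1 (this ▸ hp)

-- Sum of Int-cast lengths equals the cast of the Nat sum.
theorem pvSum_len (hs : List (Int × Int)) (f : Int × Int → PySem.Set (Int × Int)) :
    (hs.map (fun h => PySem.Set.len (f h))).sum =
      ((hs.map (fun h => (f h).length)).sum : Int) := by
  induction hs with
  | nil => simp
  | cons q rest _ => simp [PySem.Set.len, Function.comp_def]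

-- ===== VERDICT (by name: the statement is the Claim_ definition above) =====
theorem count_trailheads_py_spec : Claim_equal_count_trailheads_py := by
  intro start end_ _
  unfold Spec_count_trailheads_py count_trailheads_py count_trailheads_py_alt
  simp only []
  set AH : PySem.Set (Int × Int) :=
    start.foldl (fun s e => PySem.Set.update s e.2.2) PySem.Set.empty with hAH
  set th : PySem.Set ((Int × Int) × Int × Int) :=
    start.foldl (fun th e =>
      (pvEndGet end_ (e.1, e.2.1)).foldl (fun th tail =>
        e.2.2.foldl (fun th head => PySem.Set.add th (head, tail)) th) th)
      PySem.Set.empty with hth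
  rw [PySem.List.foldl_add (g := fun head => PySem.Set.len (pvTailsOf start end_ head))]
  rw [pvSum_len, zero_add]
  have hthn : th.Nodup := pvA_nodup end_ start _ (by simp [PySem.Set.empty])
  have hAHn : AH.Nodup := pvAllHeads_nodup start _ (by simp [PySem.Set.empty])
  have hflatn : (AH.flatMap (fun h => (pvTailsOf start end_ h).map (fun t => (h, t)))).Nodup :=
    pvFlat_nodup AH _ hAHn (fun h => pvTailsOf_nodup start end_ h)
  have hperm : th.Perm (AH.flatMap (fun h => (pvTailsOf start end_ h).map (fun t => (h, t)))) := by
    refine (List.perm_ext_iff_of_nodup hthn hflatn).mpr (fun p => ?_)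
    rw [hth, pvA_mem]
    simp only [PySem.Set.empty, List.not_mem_nil, false_or]
    constructor
    · rintro ⟨e, he, h1, h2⟩
      refine List.mem_flatMap.mpr ⟨p.1, ?_, List.mem_map.mpr ⟨p.2, ?_, rfl⟩⟩
      · rw [hAH, pvAllHeads_mem]
        exact Or.inr ⟨e, he, h1⟩
      · exact (pvTailsOf_mem start end_ p.1 p.2).mpr ⟨e, he, h1, h2⟩
    · intro hp
      obtain ⟨h, hh, h2⟩ := List.mem_flatMap.mp hp
      obtain ⟨t, ht, h3⟩ := List.mem_map.mp h2
      obtain ⟨e, he, h4, h5⟩ := (pvTailsOf_mem start end_ h t).mp ht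
      subst h3
      exact ⟨e, he, h4, h5⟩
  have hlen := hperm.length_eq
  rw [List.length_flatMap] at hlen
  rw [PySem.Set.len, hlen]
  simp
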